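-- pv_equiv track=rewrite | github.com/gcross/Carcassonne | carcassonne/utils.py | computePostContractionIndexMap
-- ===== SOURCE A (Python) =====
-- def computePostContractionIndexMap(rank,contracted_indices,offset=0): # {{{
--     contracted_indices = set(contracted_indices)
--     index_map = dict()
--     new_index = 0
--     for old_index in range(rank):
--         if old_index not in contracted_indices:
--             index_map[old_index] = new_index + offset
--             new_index += 1
--     return index_map
-- ===== SOURCE B (Python) =====
-- def computePostContractionIndexMap(rank, contracted_indices, offset=0):
--     contracted = {c for c in contracted_indices if 0 <= c < rank}
--     return {old_index: old_index - sum(1 for c in contracted if c < old_index) + offset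
--             for old_index in range(rank)
--             if old_index not in contracted}
-- ===== Notes on version B (the rewrite author's own statement) =====
-- stated objective: alternative
-- what changed: Replaces A's running new_index accumulator with a direct dict comprehension: the contracted indices are first filtered to [0, rank) and deduped into a set, and each kept index's new position is computed in closed form as old_index minus the number of contracted indices below it, plus offset.
import Mathlib
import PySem

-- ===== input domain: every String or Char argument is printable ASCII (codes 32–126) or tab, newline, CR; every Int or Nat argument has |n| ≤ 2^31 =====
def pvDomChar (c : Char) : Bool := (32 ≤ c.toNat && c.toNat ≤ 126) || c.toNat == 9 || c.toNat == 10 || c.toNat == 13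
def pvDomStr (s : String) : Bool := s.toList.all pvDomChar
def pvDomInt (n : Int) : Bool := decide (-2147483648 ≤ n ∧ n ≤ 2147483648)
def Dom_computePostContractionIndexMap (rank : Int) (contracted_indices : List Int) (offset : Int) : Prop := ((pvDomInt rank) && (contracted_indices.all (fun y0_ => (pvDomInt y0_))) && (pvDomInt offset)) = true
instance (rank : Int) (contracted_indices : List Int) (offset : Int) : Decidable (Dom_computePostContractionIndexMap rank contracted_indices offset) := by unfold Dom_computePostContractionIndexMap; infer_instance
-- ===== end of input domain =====

-- B replaces A's running new_index counter with a per-index closed-form position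
-- (old_index minus the number of distinct in-range contracted indices below it); alternative decomposition, not faster.

-- ===== PORT A =====
def computePostContractionIndexMap (rank : Int) (contracted_indices : List Int) (offset : Int) : List (Int × Int) :=
  let cset : PySem.Set Int := PySem.Set.ofList contracted_indices
  let res := (PySem.List.pyRange 0 rank 1).foldl
    (fun (st : PySem.Dict Int Int × Int) old_index =>
      if PySem.Set.contains cset old_index = false
      then (st.1.insert old_index (st.2 + offset), st.2 + 1)
      else st)
    (PySem.Dict.empty, 0)
  res.1.items

-- ===== PORT B =====
def computePostContractionIndexMap_alt (rank : Int) (contracted_indices : List Int) (offset : Int) : List (Int × Int) :=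
  let contracted : PySem.Set Int :=
    PySem.Set.ofList (contracted_indices.filter (fun c => decide (0 ≤ c) && decide (c < rank)))
  (PySem.List.pyRange 0 rank 1).filterMap (fun old_index =>
    if PySem.Set.contains contracted old_index
    then none
    else some (old_index,
      old_index - (contracted.countP (fun c => decide (c < old_index)) : Int) + offset))

-- ===== PRECONDITION & SPEC =====
def Spec_computePostContractionIndexMap (rank : Int) (contracted_indices : List Int) (offset : Int) (out : List (Int × Int)) : Prop := out = computePostContractionIndexMap_alt rank contracted_indices offset
instance (rank : Int) (contracted_indices : List Int) (offset : Int) (out : List (Int × Int)) : Decidable (Spec_computePostContractionIndexMap rank contracted_indices offset out) := by unfold Spec_computePostContractionIndexMap; infer_instance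

-- ===== CLAIM (what is proved, stated in full; the proofs are below) =====
def Claim_equal_computePostContractionIndexMap : Prop := ∀ (rank : Int) (contracted_indices : List Int) (offset : Int), Dom_computePostContractionIndexMap rank contracted_indices offset → Spec_computePostContractionIndexMap rank contracted_indices offset (computePostContractionIndexMap rank contracted_indices offset)

-- ===== LEMMAS AND PROOFS =====

-- countP of (· < n+1) splits into (· < n) plus the multiplicity of n itself.
lemma pv_countP_succ (l : List Int) (n : Int) :
    l.countP (fun c => decide (c < n + 1)) = l.countP (fun c => decide (c < n)) + l.count n := by
  induction l with
  | nil => simp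
  | cons x xs ih =>
    simp only [List.countP_cons, List.count_cons, ih]
    by_cases hx : x = n
    · simp [hx]; omega
    · by_cases hlt : x < n
      · have h1 : (x < n + 1) := by omega
        simp [hlt, h1, hx]; omega
      · have h1 : ¬ (x < n + 1) := by omega
        simp [hlt, h1, hx]

-- the loop invariant: after processing range(n), A's dict items are B's filterMap prefix and
-- A's running counter equals n minus the number of in-range contracted indices below n.
lemma pv_loop (rank : Int) (cs : List Int) (offset : Int) (n : Nat) (hn : (n : Int) ≤ rank) :
    (((PySem.List.pyRange 0 (n : Int) 1).foldl
        (fun (st : PySem.Dict Int Int × Int) old_index =>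
          if PySem.Set.contains (PySem.Set.ofList cs) old_index = false
          then (st.1.insert old_index (st.2 + offset), st.2 + 1)
          else st)
        (PySem.Dict.empty, 0)).1.items
      = (PySem.List.pyRange 0 (n : Int) 1).filterMap (fun old_index =>
          if PySem.Set.contains
              (PySem.Set.ofList (cs.filter (fun c => decide (0 ≤ c) && decide (c < rank)))) old_index
          then none
          else some (old_index,
            old_index - ((PySem.Set.ofList
              (cs.filter (fun c => decide (0 ≤ c) && decide (c < rank)))).countP
                (fun c => decide (c < old_index)) : Int) + offset)))
    ∧ (((PySem.List.pyRange 0 (n : Int) 1).foldl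
        (fun (st : PySem.Dict Int Int × Int) old_index =>
          if PySem.Set.contains (PySem.Set.ofList cs) old_index = false
          then (st.1.insert old_index (st.2 + offset), st.2 + 1)
          else st)
        (PySem.Dict.empty, 0)).2
      = (n : Int) - ((PySem.Set.ofList
          (cs.filter (fun c => decide (0 ≤ c) && decide (c < rank)))).countP
            (fun c => decide (c < (n : Int))) : Int)) := by
  induction n with
  | zero =>
    rw [show (((0 : Nat) : Int)) = 0 from rfl, PySem.List.pyRange_one_eq_nil le_rfl]
    refine ⟨rfl, ?_⟩
    have hz : ((PySem.Set.ofList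
        (cs.filter (fun c => decide (0 ≤ c) && decide (c < rank)))).countP
          (fun c => decide (c < (0 : Int)))) = 0 := by
      apply List.countP_eq_zero.mpr
      intro c hc
      have hc2 := List.mem_filter.mp ((PySem.Set.mem_ofList _ _).mp hc)
      simp only [Bool.and_eq_true, decide_eq_true_eq] at hc2 ⊢
      omega
    simp [hz]
  | succ n ih =>
    have hn' : ((n : Nat) : Int) ≤ rank := by push_cast at hn ⊢; omega
    obtain ⟨ih1, ih2⟩ := ih hn'
    have hbound : (0 : Int) ≤ (n : Int) ∧ ((n : Int)) < rank := by push_cast at hn; omega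
    have hcast : (((n + 1 : Nat)) : Int) = (n : Int) + 1 := by push_cast; ring
    rw [hcast, PySem.List.pyRange_one_succ_right (by exact_mod_cast Int.natCast_nonneg n)]
    rw [List.foldl_append, List.filterMap_append]
    simp only [List.foldl_cons, List.foldl_nil]
    by_cases hm : ((n : Int)) ∈ (PySem.Set.ofList
        (cs.filter (fun c => decide (0 ≤ c) && decide (c < rank))))
    · -- contracted: A skips, B emits nothing
      have hin : ((n : Int)) ∈ cs := by
        have := List.mem_filter.mp ((PySem.Set.mem_ofList _ _).mp hm)
        exact this.1
      have hA : (PySem.Set.ofList cs).contains ((n : Int)) = true :=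
        (PySem.Set.contains_iff _ _).mpr ((PySem.Set.mem_ofList _ _).mpr hin)
      have hB : (PySem.Set.ofList
          (cs.filter (fun c => decide (0 ≤ c) && decide (c < rank)))).contains ((n : Int)) = true :=
        (PySem.Set.contains_iff _ _).mpr hm
      refine ⟨?_, ?_⟩
      · rw [hA, if_neg (by decide), ih1]
        simp [hin, hbound.2]
      · rw [hA, if_neg (by decide), ih2, pv_countP_succ,
          List.count_eq_one_of_mem (PySem.Set.nodup_ofList _) hm]
        push_cast
        ring
    · -- not contracted: A inserts a fresh key, B emits one pair
      have hnotcs : ((n : Int)) ∉ cs := by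
        intro hin
        exact hm ((PySem.Set.mem_ofList _ _).mpr (List.mem_filter.mpr
          ⟨hin, by simp only [Bool.and_eq_true, decide_eq_true_eq]; omega⟩))
      have hA : (PySem.Set.ofList cs).contains ((n : Int)) = false := by
        rw [← Bool.not_eq_true, PySem.Set.contains_iff, PySem.Set.mem_ofList]
        exact hnotcs
      have hB : (PySem.Set.ofList
          (cs.filter (fun c => decide (0 ≤ c) && decide (c < rank)))).contains ((n : Int)) = false := by
        rw [← Bool.not_eq_true, PySem.Set.contains_iff]
        exact hm
      have hfresh : ((PySem.List.pyRange 0 ((n : Nat) : Int) 1).foldl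
          (fun (st : PySem.Dict Int Int × Int) old_index =>
            if PySem.Set.contains (PySem.Set.ofList cs) old_index = false
            then (st.1.insert old_index (st.2 + offset), st.2 + 1)
            else st)
          (PySem.Dict.empty, 0)).1.contains ((n : Int)) = false := by
        rw [PySem.Dict.contains_eq_decide_mem_keys, decide_eq_false_iff_not]
        simp only [PySem.Dict.keys]
        rw [ih1]
        intro hk
        obtain ⟨p, hp, hfst⟩ := List.mem_map.mp hk
        obtain ⟨a, ha, hg⟩ := List.mem_filterMap.mp hp
        have halt : a < ((n : Int)) := (PySem.List.mem_pyRange_one.mp ha).2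
        by_cases hca : (PySem.Set.ofList
            (cs.filter (fun c => decide (0 ≤ c) && decide (c < rank)))).contains a
        · rw [if_pos hca] at hg; simp at hg
        · rw [if_neg hca] at hg
          have : p.1 = a := by
            have := Option.some.inj hg
            rw [← this]
          omega
      refine ⟨?_, ?_⟩
      · rw [hA, if_pos rfl]
        rw [PySem.Dict.items_insert_of_not_contains _ _ hfresh, ih1, ih2]
        simp [hnotcs]
      · rw [hA, if_pos rfl, ih2, pv_countP_succ, List.count_eq_zero_of_not_mem hm]
        push_cast
        ring

-- ===== VERDICT (by name: the statement is the Claim_ definition above) =====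
theorem computePostContractionIndexMap_spec : Claim_equal_computePostContractionIndexMap := by
  intro rank cs offset _
  unfold Spec_computePostContractionIndexMap computePostContractionIndexMap computePostContractionIndexMap_alt
  by_cases hr : rank ≤ 0
  · rw [PySem.List.pyRange_one_eq_nil (by omega)]
    rfl
  · have h0 : ((rank.toNat : Int)) = rank := by omega
    have := (pv_loop rank cs offset rank.toNat (by omega)).1
    rw [h0] at this
    simpa using this
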